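-- pv_equiv track=rewrite | github.com/miao4ai/recruitGPT | src/graph/builder.py | _role_family
-- ===== SOURCE A (Python) =====
-- def _norm(text: str) -> str:
--     """Lowercase-strip normalisation for node IDs."""
--     return text.strip().lower()
--
-- def _role_family(role_title: str) -> str:
--     """Extract a coarse role family from a title for career-path edges.
--
--     E.g. 'Senior Backend Engineer' -> 'backend engineer'
--     """
--     t = _norm(role_title)
--     # Strip common seniority prefixes
--     for prefix in ("senior ", "sr. ", "staff ", "lead ", "principal ",
--                    "junior ", "associate ", "intern "):
--         if t.startswith(prefix):
--             t = t[len(prefix):]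
--             break
--     return t
-- ===== SOURCE B (Python) =====
-- _SENIORITY = {"senior", "sr.", "staff", "lead", "principal",
--               "junior", "associate", "intern"}
--
-- def _role_family(role_title: str) -> str:
--     """Extract a coarse role family from a title for career-path edges."""
--     t = role_title.strip().lower()
--     head, sep, rest = t.partition(" ")
--     if sep and head in _SENIORITY:
--         return rest
--     return t
-- ===== Notes on version B (the rewrite author's own statement) =====
-- stated objective: idiomatic
-- what changed: B replaces A's loop of startswith/slice tests over eight seniority prefixes by a single str.partition at the first space plus one set-membership test on the head token (valid since every prefix is word+space and none prefixes another).
import Mathlib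
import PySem

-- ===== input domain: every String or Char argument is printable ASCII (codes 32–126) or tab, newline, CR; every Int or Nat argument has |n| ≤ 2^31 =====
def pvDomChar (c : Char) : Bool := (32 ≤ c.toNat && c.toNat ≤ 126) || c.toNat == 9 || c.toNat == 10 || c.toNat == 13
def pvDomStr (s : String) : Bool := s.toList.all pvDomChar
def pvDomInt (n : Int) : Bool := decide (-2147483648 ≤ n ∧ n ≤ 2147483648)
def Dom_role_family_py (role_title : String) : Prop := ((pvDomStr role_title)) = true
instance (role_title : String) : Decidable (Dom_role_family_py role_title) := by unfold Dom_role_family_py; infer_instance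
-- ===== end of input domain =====

-- B replaces the prefix-scanning loop by one partition at the first space plus a set-membership
-- test on the head token (objective: alternative decomposition, same cost).


-- ===== PORT A =====
-- the tuple of prefixes A scans, in order
def pvPrefixesA : List (List Char) :=
  ["senior ".toList, "sr. ".toList, "staff ".toList, "lead ".toList,
   "principal ".toList, "junior ".toList, "associate ".toList, "intern ".toList]

-- A's for-loop with break: first matching prefix is stripped (t[len(prefix):]), then stop
def pvStripA : List (List Char) → List Char → List Char
  | [], t => t
  | p :: ps, t =>
      if PySem.Chars.startswith t p then
        PySem.List.slice t (some (p.length : Int)) none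
      else pvStripA ps t

def role_family_py (role_title : String) : String :=
  let t := (PySem.Str.lower (PySem.Str.strip role_title)).toList
  String.ofList (pvStripA pvPrefixesA t)

-- ===== PORT B =====
def pvWordsB : List (List Char) :=
  ["senior".toList, "sr.".toList, "staff".toList, "lead".toList,
   "principal".toList, "junior".toList, "associate".toList, "intern".toList]

-- t.partition(" "): (head, found-separator?, rest)
def pvPart : List Char → List Char × Bool × List Char
  | [] => ([], false, [])
  | c :: cs =>
      if c = ' ' then ([], true, cs)
      else
        let (h, f, r) := pvPart cs
        (c :: h, f, r)

def role_family_py_alt (role_title : String) : String :=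
  let t := (PySem.Str.lower (PySem.Str.strip role_title)).toList
  let (h, f, r) := pvPart t
  String.ofList (if f && pvWordsB.contains h then r else t)

-- ===== PRECONDITION & SPEC =====
def Spec_role_family_py (role_title : String) (out : String) : Prop := out = role_family_py_alt role_title
instance (role_title : String) (out : String) : Decidable (Spec_role_family_py role_title out) := by unfold Spec_role_family_py; infer_instance

-- ===== CLAIM (what is proved, stated in full; the proofs are below) =====
def Claim_equal_role_family_py : Prop := ∀ (role_title : String), Dom_role_family_py role_title → Spec_role_family_py role_title (role_family_py role_title)

-- ===== LEMMAS AND PROOFS =====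

-- pvPart t decomposes t at its first space
theorem pvPart_spec (t : List Char) :
    (((pvPart t).2.1 = true → t = (pvPart t).1 ++ ' ' :: (pvPart t).2.2 ∧ ' ' ∉ (pvPart t).1) ∧
     ((pvPart t).2.1 = false → t = (pvPart t).1 ∧ ' ' ∉ (pvPart t).1)) := by
  induction t with
  | nil => simp [pvPart]
  | cons c cs ih =>
    by_cases hc : c = ' '
    · subst hc; simp [pvPart]
    · simp only [pvPart, if_neg hc]
      obtain ⟨ih₁, ih₂⟩ := ih
      have hcs : ¬ (' ' = c) := fun e => hc e.symm
      constructor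
      · intro hf
        obtain ⟨he, hm⟩ := ih₁ hf
        exact ⟨by simpa using congrArg (c :: ·) he, by simp [hm, hcs]⟩
      · intro hf
        obtain ⟨he, hm⟩ := ih₂ hf
        exact ⟨by simpa using congrArg (c :: ·) he, by simp [hm, hcs]⟩

-- 'w ' is a prefix of 'h <space> r' (h space-free) exactly when w = h
theorem prefix_space {w h : List Char} (r : List Char) (hw : ' ' ∉ w) (hh : ' ' ∉ h) :
    ((w ++ [' ']) <+: (h ++ ' ' :: r)) ↔ w = h := by
  induction w generalizing h with
  | nil =>
    cases h with
    | nil => simp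
    | cons c h' =>
      have hc : ¬ (' ' = c) := fun e => hh (by simp [← e])
      simp [List.cons_prefix_cons, hc]
  | cons a w' ih =>
    cases h with
    | nil =>
      have ha : ¬ (a = ' ') := fun e => hw (by simp [e])
      simp [List.cons_prefix_cons, ha]
    | cons c h' =>
      have hw' : ' ' ∉ w' := fun m => hw (List.mem_cons_of_mem _ m)
      have hh' : ' ' ∉ h' := fun m => hh (List.mem_cons_of_mem _ m)
      simp [List.cons_prefix_cons, ih hw' hh']

-- a needle containing a space never starts a space-free string
theorem startswith_false_of_space (t w : List Char) (hw : ' ' ∈ w) (ht : ' ' ∉ t) :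
    PySem.Chars.startswith t w = false := by
  rw [Bool.eq_false_iff]
  intro hs
  exact ht (((PySem.Chars.startswith_iff t w).mp hs).sublist.mem hw)

-- dropping |w|+1 characters after the matched 'w ' leaves exactly the rest
theorem slice_after_prefix (w r : List Char) :
    PySem.List.slice ((w ++ [' ']) ++ r) (some (((w ++ [' ']).length : Nat) : Int)) none = r := by
  rw [PySem.List.slice_from_natCast]
  exact List.drop_left

-- the core: A's scan-and-break loop over any space-free word list equals B's partition form
theorem gen_loop_eq_part (ws : List (List Char)) (hws : ∀ w ∈ ws, ' ' ∉ w) (t : List Char) :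
    pvStripA (ws.map (· ++ [' '])) t =
      (if (pvPart t).2.1 && ws.contains (pvPart t).1 then (pvPart t).2.2 else t) := by
  obtain ⟨hT, hF⟩ := pvPart_spec t
  induction ws with
  | nil => simp [pvStripA]
  | cons w ws ih =>
    have hwns : ' ' ∉ w := hws w (by simp)
    have ih' := ih (fun x hx => hws x (List.mem_cons_of_mem _ hx))
    simp only [List.map_cons, pvStripA]
    cases hf : (pvPart t).2.1 with
    | false =>
      obtain ⟨he, hm⟩ := hF hf
      have hns : ' ' ∉ t := he ▸ hm
      rw [startswith_false_of_space t _ (by simp) hns]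
      simp only [Bool.false_eq_true, if_false]
      rw [ih']
      simp [hf]
    | true =>
      obtain ⟨he, hm⟩ := hT hf
      by_cases hwh : w = (pvPart t).1
      · have hsw : PySem.Chars.startswith t (w ++ [' ']) = true :=
          (PySem.Chars.startswith_iff t (w ++ [' '])).mpr
            (by rw [he]; exact (prefix_space _ hwns hm).mpr hwh)
        have hmem : (w :: ws).contains (pvPart t).1 = true := by
          simp [List.contains_eq_mem, ← hwh]
        have hS : PySem.List.slice t (some (((w ++ [' ']).length : Nat) : Int)) none
            = (pvPart t).2.2 := by
          conv_lhs => rw [he, hwh]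
          rw [show ((pvPart t).1 ++ ' ' :: (pvPart t).2.2)
                 = ((pvPart t).1 ++ [' ']) ++ (pvPart t).2.2 by simp]
          exact slice_after_prefix _ _
        rw [hsw, hmem]
        simpa using hS
      · have hsw : PySem.Chars.startswith t (w ++ [' ']) = false := by
          rw [Bool.eq_false_iff]
          intro hs
          exact hwh ((prefix_space _ hwns hm).mp
            (by rw [← he]; exact (PySem.Chars.startswith_iff t (w ++ [' '])).mp hs))
        have hne : (pvPart t).1 ≠ w := fun e => hwh e.symm
        have hcw : (w :: ws).contains (pvPart t).1 = ws.contains (pvPart t).1 := by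
          simp [List.contains_eq_mem, hne]
        rw [hsw]
        simp only [Bool.false_eq_true, if_false]
        rw [ih', hcw, hf]

theorem loop_eq_part (t : List Char) :
    pvStripA pvPrefixesA t =
      (if (pvPart t).2.1 && pvWordsB.contains (pvPart t).1 then (pvPart t).2.2 else t) := by
  have h : pvPrefixesA = pvWordsB.map (· ++ [' ']) := by decide
  rw [h]
  exact gen_loop_eq_part pvWordsB (by decide) t

-- ===== VERDICT (by name: the statement is the Claim_ definition above) =====
theorem role_family_py_spec : Claim_equal_role_family_py := by
  intro s _
  unfold Spec_role_family_py role_family_py role_family_py_alt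
  have h := loop_eq_part (PySem.Str.lower (PySem.Str.strip s)).toList
  rcases hE : pvPart (PySem.Str.lower (PySem.Str.strip s)).toList with ⟨hd, f, r⟩
  rw [hE] at h
  simp only [hE, h]
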